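-- pv_equiv track=rewrite | github.com/mariakainat2025/Contrastive-learning-methodology | extract_windows.py | _dedup_files
-- ===== SOURCE A (Python) =====
-- def _dedup_files(node_set, edges, id_nodetype_map, id_nodename_map):
--     file_paths = {
--         uid: id_nodename_map.get(uid, uid)
--         for uid in node_set
--         if id_nodetype_map.get(uid) == 'FILE_OBJECT_BLOCK'
--     }
--     all_paths = set(file_paths.values())
--
--     cascade_remove = set()
--     for uid, path in file_paths.items():
--         for other in all_paths:
--             if other != path and other.startswith(path.rstrip('/') + '/'):
--                 cascade_remove.add(uid)
--                 break
--
--     path_to_repr = {}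
--     file_dedup   = {}
--     for uid in list(node_set):
--         if id_nodetype_map.get(uid) != 'FILE_OBJECT_BLOCK':
--             continue
--         if uid in cascade_remove:
--             file_dedup[uid] = None
--             continue
--         path = id_nodename_map.get(uid, uid)
--         if path not in path_to_repr:
--             path_to_repr[path] = uid
--         else:
--             file_dedup[uid] = path_to_repr[path]
--
--     if not file_dedup:
--         return node_set, edges, {}
--
--     seen_keys = set()
--     new_edges = []
--     for e in edges:
--         s = file_dedup.get(e['src'], e['src'])
--         d = file_dedup.get(e['dst'], e['dst'])
--         if s is None or d is None:
--             continue
--         if s == d: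
--             continue
--         key = (s, d, e['edge_type'])
--         if key not in seen_keys:
--             new_edges.append({**e, 'src': s, 'dst': d})
--             seen_keys.add(key)
--
--     new_nodes = set()
--     for e in new_edges:
--         new_nodes.add(e['src'])
--         new_nodes.add(e['dst'])
--     return new_nodes, new_edges, file_dedup
-- ===== SOURCE B (Python) =====
-- # B: one-pass directory-prefix counter replaces A's quadratic all-pairs startswith scan.
--
-- def _slash_prefixes(q):
--     out = []
--     for i, ch in enumerate(q):
--         if ch == '/':
--             r = q[:i]
--             if r not in out:
--                 out.append(r)
--     return out
--
--
-- def _remap_edge(e, file_dedup, seen_keys):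
--     s = file_dedup.get(e['src'], e['src'])
--     d = file_dedup.get(e['dst'], e['dst'])
--     if s is None or d is None or s == d:
--         return None
--     key = (s, d, e['edge_type'])
--     if key in seen_keys:
--         return None
--     seen_keys.add(key)
--     return {**e, 'src': s, 'dst': d}
--
--
-- def _dedup_files(node_set, edges, id_nodetype_map, id_nodename_map):
--     file_items = [(u, id_nodename_map.get(u, u))
--                   for u in node_set
--                   if id_nodetype_map.get(u) == 'FILE_OBJECT_BLOCK']
--     paths = set(p for _, p in file_items)
--
--     # below[r] = number of distinct file paths lying strictly inside directory r
--     below = {}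
--     for q in paths:
--         for r in _slash_prefixes(q):
--             below[r] = below.get(r, 0) + 1
--
--     path_to_repr = {}
--     file_dedup = {}
--     for u, p in file_items:
--         r = p.rstrip('/')
--         if below.get(r, 0) >= (2 if p != r else 1):
--             file_dedup[u] = None
--         elif p in path_to_repr:
--             file_dedup[u] = path_to_repr[p]
--         else:
--             path_to_repr[p] = u
--
--     if not file_dedup:
--         return node_set, edges, {}
--
--     seen_keys = set()
--     new_edges = []
--     for e in edges:
--         ne = _remap_edge(e, file_dedup, seen_keys)
--         if ne is not None:
--             new_edges.append(ne)
--
--     new_nodes = set()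
--     for e in new_edges:
--         new_nodes.add(e['src'])
--         new_nodes.add(e['dst'])
--     return new_nodes, new_edges, file_dedup
-- ===== Notes on version B (the rewrite author's own statement) =====
-- stated objective: alternative
-- what changed: A decides 'this path has a descendant' by scanning every other file path with startswith; B instead makes one pass over the paths, counting for each directory prefix r (text before a '/') how many distinct paths lie strictly below it, and answers each per-path test with a single counter lookup 'below[p.rstrip('/')] >= (2 if p ends in '/' else 1)'.
import Mathlib
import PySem

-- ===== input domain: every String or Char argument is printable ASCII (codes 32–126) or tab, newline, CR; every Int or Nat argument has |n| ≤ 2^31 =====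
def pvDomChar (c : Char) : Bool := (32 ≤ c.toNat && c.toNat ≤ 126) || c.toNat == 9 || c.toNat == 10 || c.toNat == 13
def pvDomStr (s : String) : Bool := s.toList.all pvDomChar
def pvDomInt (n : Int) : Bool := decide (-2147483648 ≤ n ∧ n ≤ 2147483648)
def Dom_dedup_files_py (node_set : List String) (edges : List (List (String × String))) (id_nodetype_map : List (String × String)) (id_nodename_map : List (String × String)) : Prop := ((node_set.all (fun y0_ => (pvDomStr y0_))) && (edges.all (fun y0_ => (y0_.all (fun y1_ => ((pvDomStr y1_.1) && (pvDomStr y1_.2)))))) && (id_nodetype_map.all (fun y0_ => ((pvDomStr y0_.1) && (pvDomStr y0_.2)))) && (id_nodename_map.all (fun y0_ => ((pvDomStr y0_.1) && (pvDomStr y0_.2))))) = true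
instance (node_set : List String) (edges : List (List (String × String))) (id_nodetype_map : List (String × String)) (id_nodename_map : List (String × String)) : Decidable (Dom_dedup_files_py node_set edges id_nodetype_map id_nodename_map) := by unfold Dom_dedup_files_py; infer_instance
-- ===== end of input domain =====

-- B answers A's per-path descendant scan with a precomputed counter of directory prefixes
-- (a different algorithm); equivalence of the RETURN value is proved on Pre_ (A raises KeyError
-- outside it).

-- shared tiny helpers: the two dict lookups and the builtin 'path.rstrip('/')' both Pythons perform
def pvTyped (tmap : List (String × String)) (u : String) : Bool :=
  PySem.Dict.get? (PySem.Dict.mk tmap) u == some "FILE_OBJECT_BLOCK"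
def pvName (nmap : List (String × String)) (u : String) : String :=
  PySem.Dict.getD (PySem.Dict.mk nmap) u u
-- exact hand port of s.rstrip('/'): drop trailing '/' characters
def pvRstripSlash (s : String) : String :=
  String.ofList ((s.toList.reverse.dropWhile (fun c => c == '/')).reverse)

-- ===== PORT A =====
def pvFilePaths (node_set : List String) (tmap nmap : List (String × String)) : PySem.Dict String String :=
  node_set.foldl (fun d u => if pvTyped tmap u then d.insert u (pvName nmap u) else d) PySem.Dict.empty

def pvAcond (all_paths : List String) (path : String) : Bool :=
  all_paths.any (fun other => other != path && PySem.Str.startswith other (pvRstripSlash path ++ "/"))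

def pvCascade (node_set : List String) (tmap nmap : List (String × String)) : PySem.Set String :=
  let fp := pvFilePaths node_set tmap nmap
  let all_paths : PySem.Set String := PySem.Set.ofList fp.values
  fp.items.foldl (fun cr p => if pvAcond all_paths p.2 then PySem.Set.add cr p.1 else cr) PySem.Set.empty

def pvStage2A (node_set : List String) (tmap nmap : List (String × String)) :
    PySem.Dict String String × PySem.Dict String (Option String) :=
  let casc := pvCascade node_set tmap nmap
  node_set.foldl (fun st u =>
    if !(pvTyped tmap u) then st
    else if PySem.Set.contains casc u then (st.1, st.2.insert u none)
    else
      let path := pvName nmap u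
      match st.1.get? path with
      | none => (st.1.insert path u, st.2)
      | some r => (st.1, st.2.insert u (some r))) (PySem.Dict.empty, PySem.Dict.empty)

def pvEdgeStepA (fd : PySem.Dict String (Option String))
    (st : PySem.Set (String × String × String) × List (List (String × String)))
    (e : List (String × String)) :
    PySem.Set (String × String × String) × List (List (String × String)) :=
  let ed := PySem.Dict.mk e
  match ed.get? "src", ed.get? "dst" with
  | some es, some edst =>
    let s : Option String := (fd.get? es).getD (some es)
    let d : Option String := (fd.get? edst).getD (some edst)
    match s, d with
    | some s', some d' =>
      if s' == d' then st
      else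
        match ed.get? "edge_type" with
        | some et =>
          if PySem.Set.contains st.1 (s', d', et) then st
          else (PySem.Set.add st.1 (s', d', et), st.2 ++ [((ed.insert "src" s').insert "dst" d').items])
        | none => st   -- Python raises KeyError here; such inputs are outside Pre_
    | _, _ => st       -- 'continue' when s or d is None
  | _, _ => st         -- Python raises KeyError (missing 'src'/'dst'); outside Pre_

def dedup_files_py (node_set : List String) (edges : List (List (String × String))) (id_nodetype_map : List (String × String)) (id_nodename_map : List (String × String)) : List String × (List (List (String × String))) × (List (String × Option String)) :=
  let fd := (pvStage2A node_set id_nodetype_map id_nodename_map).2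
  if fd.size == 0 then (node_set, edges, [])
  else
    let r := edges.foldl (pvEdgeStepA fd) (PySem.Set.empty, [])
    let new_nodes := r.2.foldl (fun ns e =>
      PySem.Set.add (PySem.Set.add ns (PySem.Dict.getD (PySem.Dict.mk e) "src" ""))
        (PySem.Dict.getD (PySem.Dict.mk e) "dst" "")) PySem.Set.empty
    (new_nodes, r.2, fd.items)

-- ===== PORT B =====
def pvSlashPrefixes (q : String) : List String :=
  (PySem.List.enumerate q.toList).foldl (fun out ic =>
    if ic.2 == '/' then PySem.Set.add out (String.ofList (PySem.List.slice q.toList none (some ic.1)))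
    else out) PySem.Set.empty

def pvBelow (paths : List String) : PySem.Dict String Int :=
  paths.foldl (fun b q =>
    (pvSlashPrefixes q).foldl (fun b r => b.insert r (b.getD r 0 + 1)) b) PySem.Dict.empty

def pvStage2B (file_items : List (String × String)) (below : PySem.Dict String Int) :
    PySem.Dict String String × PySem.Dict String (Option String) :=
  file_items.foldl (fun st up =>
    let r := pvRstripSlash up.2
    if below.getD r 0 ≥ (if up.2 != r then (2 : Int) else 1) then (st.1, st.2.insert up.1 none)
    else
      match st.1.get? up.2 with
      | some rep => (st.1, st.2.insert up.1 (some rep))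
      | none => (st.1.insert up.2 up.1, st.2)) (PySem.Dict.empty, PySem.Dict.empty)

def pvRemapEdge (e : List (String × String)) (fd : PySem.Dict String (Option String))
    (seen : PySem.Set (String × String × String)) :
    PySem.Set (String × String × String) × Option (List (String × String)) :=
  let ed := PySem.Dict.mk e
  match ed.get? "src", ed.get? "dst" with
  | some es, some edst =>
    let s : Option String := (fd.get? es).getD (some es)
    let d : Option String := (fd.get? edst).getD (some edst)
    match s, d with
    | some s', some d' =>
      if s' == d' then (seen, none)
      else
        match ed.get? "edge_type" with
        | some et =>
          if PySem.Set.contains seen (s', d', et) then (seen, none)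
          else (PySem.Set.add seen (s', d', et), some ((ed.insert "src" s').insert "dst" d').items)
        | none => (seen, none)   -- Python raises KeyError here; outside Pre_
    | _, _ => (seen, none)
  | _, _ => (seen, none)         -- Python raises KeyError; outside Pre_

def dedup_files_py_alt (node_set : List String) (edges : List (List (String × String))) (id_nodetype_map : List (String × String)) (id_nodename_map : List (String × String)) : List String × (List (List (String × String))) × (List (String × Option String)) :=
  let file_items := node_set.filterMap (fun u =>
    if pvTyped id_nodetype_map u then some (u, pvName id_nodename_map u) else none)
  let paths : PySem.Set String := PySem.Set.ofList (file_items.map (·.2))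
  let below := pvBelow paths
  let fd := (pvStage2B file_items below).2
  if fd.size == 0 then (node_set, edges, [])
  else
    let r := edges.foldl (fun st e =>
      match pvRemapEdge e fd st.1 with
      | (seen, some ne) => (seen, st.2 ++ [ne])
      | (seen, none) => (seen, st.2)) (PySem.Set.empty, [])
    let new_nodes := r.2.foldl (fun ns e =>
      PySem.Set.add (PySem.Set.add ns (PySem.Dict.getD (PySem.Dict.mk e) "src" ""))
        (PySem.Dict.getD (PySem.Dict.mk e) "dst" "")) PySem.Set.empty
    (new_nodes, r.2, fd.items)

-- ===== PRECONDITION & SPEC =====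
-- Pre_ excludes the inputs where A raises KeyError: an edge dict without 'src'/'dst'/'edge_type'
-- is indexed as soon as some file node gets merged, so Pre_ asks for those keys on every edge
-- unless no merge happens (the file paths are pairwise distinct and none lies under another);
-- it is marginally narrower than A's exact returning set: an unkeyed edge that is skipped before
-- the missing key is read (both endpoints merged away or mapped to the same node) still returns
-- in A, and B matches it there.
def Pre_dedup_files_py (node_set : List String) (edges : List (List (String × String))) (id_nodetype_map : List (String × String)) (id_nodename_map : List (String × String)) : Prop :=
  (∀ e ∈ edges, (PySem.Dict.mk e).contains "src" = true ∧ (PySem.Dict.mk e).contains "dst" = true ∧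
      (PySem.Dict.mk e).contains "edge_type" = true) ∨
  (((node_set.filter (fun u => PySem.Dict.get? (PySem.Dict.mk id_nodetype_map) u == some "FILE_OBJECT_BLOCK")).map
      (fun u => PySem.Dict.getD (PySem.Dict.mk id_nodename_map) u u)).Nodup ∧
    ∀ p ∈ (node_set.filter (fun u => PySem.Dict.get? (PySem.Dict.mk id_nodetype_map) u == some "FILE_OBJECT_BLOCK")).map
        (fun u => PySem.Dict.getD (PySem.Dict.mk id_nodename_map) u u),
      ∀ q ∈ (node_set.filter (fun u => PySem.Dict.get? (PySem.Dict.mk id_nodetype_map) u == some "FILE_OBJECT_BLOCK")).map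
        (fun u => PySem.Dict.getD (PySem.Dict.mk id_nodename_map) u u),
      q ≠ p → PySem.Str.startswith q (pvRstripSlash p ++ "/") = false)

instance (node_set : List String) (edges : List (List (String × String))) (id_nodetype_map : List (String × String)) (id_nodename_map : List (String × String)) : Decidable (Pre_dedup_files_py node_set edges id_nodetype_map id_nodename_map) := by
  unfold Pre_dedup_files_py; infer_instance

def pvWitness_dedup_files_py : List String × (List (List (String × String))) × (List (String × String)) × (List (String × String)) :=
  (["a", "b"], [[("src", "a"), ("dst", "b"), ("edge_type", "t")]],
   [("a", "FILE_OBJECT_BLOCK"), ("b", "FILE_OBJECT_BLOCK")], [("a", "p"), ("b", "p/q")])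

def Spec_dedup_files_py (node_set : List String) (edges : List (List (String × String))) (id_nodetype_map : List (String × String)) (id_nodename_map : List (String × String)) (out : List String × (List (List (String × String))) × (List (String × Option String))) : Prop := out = dedup_files_py_alt node_set edges id_nodetype_map id_nodename_map
instance (node_set : List String) (edges : List (List (String × String))) (id_nodetype_map : List (String × String)) (id_nodename_map : List (String × String)) (out : List String × (List (List (String × String))) × (List (String × Option String))) : Decidable (Spec_dedup_files_py node_set edges id_nodetype_map id_nodename_map out) := by unfold Spec_dedup_files_py; infer_instance

-- ===== CLAIM (what is proved, stated in full; the proofs are below) =====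
def Claim_equal_dedup_files_py : Prop := ∀ (node_set : List String) (edges : List (List (String × String))) (id_nodetype_map : List (String × String)) (id_nodename_map : List (String × String)), Dom_dedup_files_py node_set edges id_nodetype_map id_nodename_map → Pre_dedup_files_py node_set edges id_nodetype_map id_nodename_map → Spec_dedup_files_py node_set edges id_nodetype_map id_nodename_map (dedup_files_py node_set edges id_nodetype_map id_nodename_map)

-- ===== LEMMAS AND PROOFS =====

-- a loop that 'continue's on !(c u) is a loop over the filtered list
theorem pv_foldl_skip {α δ : Type} (c : α → Bool) (f : δ → α → δ) :
    ∀ (l : List α) (init : δ),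
      l.foldl (fun st u => if !(c u) then st else f st u) init = (l.filter c).foldl f init := by
  intro l
  induction l with
  | nil => intro init; rfl
  | cons u t ih =>
    intro init
    cases h : c u with
    | true =>
      simp only [List.foldl_cons, List.filter_cons, h, Bool.not_true, Bool.false_eq_true,
        if_false, if_true]
      exact ih _
    | false =>
      simp only [List.foldl_cons, List.filter_cons, h, Bool.not_false, Bool.false_eq_true,
        if_false, if_true]
      exact ih _

-- the filtered comprehension of B
theorem pv_filterMap_eq {α β : Type} (c : α → Bool) (g : α → β) (l : List α) :
    l.filterMap (fun u => if c u then some (g u) else none) = (l.filter c).map g := by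
  induction l with
  | nil => rfl
  | cons u t ih =>
    by_cases h : c u = true <;> simp [List.filterMap_cons, List.filter_cons, h, ih]

-- get? of the file_paths-building insert loop
theorem pv_get?_foldl_insert (nmap : List (String × String)) :
    ∀ (l : List String) (d : PySem.Dict String String) (x : String),
      (l.foldl (fun d u => d.insert u (pvName nmap u)) d).get? x
        = if x ∈ l then some (pvName nmap x) else d.get? x := by
  intro l
  induction l with
  | nil => intro d x; simp
  | cons u t ih =>
    intro d x
    simp only [List.foldl_cons]
    rw [ih]
    by_cases hx : x ∈ t
    · simp [hx]
    · simp only [hx, if_false]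
      rw [PySem.Dict.get?_insert]
      by_cases hxu : x = u
      · subst hxu; simp [hx]
      · simp [List.mem_cons, hxu, hx]

theorem pv_get?_filePaths (node_set : List String) (tmap nmap : List (String × String)) (x : String) :
    (pvFilePaths node_set tmap nmap).get? x
      = if x ∈ node_set.filter (pvTyped tmap) then some (pvName nmap x) else none := by
  unfold pvFilePaths
  rw [PySem.List.foldl_if_eq_foldl_filter]
  rw [pv_get?_foldl_insert]
  simp [PySem.Dict.get?_empty]

theorem pv_nodup_keys_filePaths (node_set : List String) (tmap nmap : List (String × String)) :
    (pvFilePaths node_set tmap nmap).keys.Nodup := by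
  unfold pvFilePaths
  rw [PySem.List.foldl_if_eq_foldl_filter]
  exact PySem.Dict.nodup_keys_foldl_insert _ (fun _ u => pvName nmap u) _ (by simp [PySem.Dict.keys_empty])

theorem pv_mem_items_filePaths (node_set : List String) (tmap nmap : List (String × String))
    (k : String) (v : String) :
    (k, v) ∈ (pvFilePaths node_set tmap nmap).items
      ↔ k ∈ node_set.filter (pvTyped tmap) ∧ v = pvName nmap k := by
  rw [← PySem.Dict.get?_eq_some_iff_mem_items _ _ _ (pv_nodup_keys_filePaths node_set tmap nmap)]
  rw [pv_get?_filePaths]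
  by_cases hk : k ∈ node_set.filter (pvTyped tmap)
  · simp [hk, eq_comm]
  · simp [hk]

theorem pv_mem_values_filePaths (node_set : List String) (tmap nmap : List (String × String))
    (v : String) :
    v ∈ (pvFilePaths node_set tmap nmap).values
      ↔ ∃ k ∈ node_set.filter (pvTyped tmap), v = pvName nmap k := by
  have hv : (pvFilePaths node_set tmap nmap).values
      = (pvFilePaths node_set tmap nmap).items.map (·.2) := rfl
  rw [hv]
  simp only [List.mem_map]
  constructor
  · rintro ⟨⟨k, w⟩, hmem, hw⟩
    have := (pv_mem_items_filePaths node_set tmap nmap k w).mp hmem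
    exact ⟨k, this.1, by simp only [← hw]; exact this.2⟩
  · rintro ⟨k, hk, hvk⟩
    exact ⟨(k, v), (pv_mem_items_filePaths node_set tmap nmap k v).mpr ⟨hk, hvk⟩, rfl⟩

theorem pv_mem_cascade (node_set : List String) (tmap nmap : List (String × String)) (u : String)
    (hu : u ∈ node_set.filter (pvTyped tmap)) :
    u ∈ pvCascade node_set tmap nmap
      ↔ pvAcond (PySem.Set.ofList (pvFilePaths node_set tmap nmap).values) (pvName nmap u) = true := by
  unfold pvCascade
  rw [PySem.List.foldl_if_eq_foldl_filter]
  rw [PySem.Set.mem_foldl_add _ (fun (p : String × String) => p.1) PySem.Set.empty u]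
  constructor
  · rintro (h | ⟨⟨k, v⟩, hmem, rfl⟩)
    · cases h
    · rw [List.mem_filter] at hmem
      have hit := (pv_mem_items_filePaths node_set tmap nmap _ v).mp hmem.1
      rw [← hit.2]
      exact hmem.2
  · intro h
    refine Or.inr ⟨(u, pvName nmap u), ?_, rfl⟩
    rw [List.mem_filter]
    exact ⟨(pv_mem_items_filePaths node_set tmap nmap u _).mpr ⟨hu, rfl⟩, h⟩

-- membership in takeWhile satisfies the predicate
theorem pv_mem_takeWhile {α : Type} (p : α → Bool) (l : List α) (b : α)
    (h : b ∈ l.takeWhile p) : p b = true := by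
  induction l with
  | nil => simp at h
  | cons x t ih =>
    rw [List.takeWhile_cons] at h
    by_cases hx : p x = true
    · simp [hx] at h
      rcases h with h | h
      · subst h; exact hx
      · exact ih h
    · simp [hx] at h

-- rstrip structure: p is its rstrip plus trailing slashes
theorem pv_rstrip_structure (p : String) :
    ∃ k : Nat, p.toList = (pvRstripSlash p).toList ++ List.replicate k '/' := by
  refine ⟨(p.toList.reverse.takeWhile (fun c => c == '/')).length, ?_⟩
  have h1 : (pvRstripSlash p).toList
      = (p.toList.reverse.dropWhile (fun c => c == '/')).reverse := by
    unfold pvRstripSlash; exact String.toList_ofList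
  have h2 : p.toList.reverse.takeWhile (fun c => c == '/')
      = List.replicate (p.toList.reverse.takeWhile (fun c => c == '/')).length '/' := by
    apply List.eq_replicate_of_mem
    intro b hb
    have hpb : (b == '/') = true := pv_mem_takeWhile (fun c => c == '/') p.toList.reverse b hb
    simpa using hpb
  rw [h1]
  conv_lhs => rw [← p.toList.reverse_reverse,
    ← List.takeWhile_append_dropWhile (p := fun c => c == '/') (l := p.toList.reverse)]
  rw [List.reverse_append]
  conv_lhs => rw [h2]
  rw [List.reverse_replicate]

theorem pv_prefix_self_iff (p : String) :
    ((pvRstripSlash p).toList ++ ['/'] <+: p.toList) ↔ p ≠ pvRstripSlash p := by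
  obtain ⟨k, hk⟩ := pv_rstrip_structure p
  constructor
  · intro hpre heq
    have hk' : (pvRstripSlash p).toList = (pvRstripSlash p).toList ++ List.replicate k '/' := by
      conv_lhs => rw [← heq]
      exact hk
    have hk0 : List.replicate k '/' = [] := (List.self_eq_append_right).mp hk'
    rw [hk, hk0, List.append_nil] at hpre
    have := hpre.length_le
    simp at this
  · intro hne
    cases k with
    | zero =>
      simp only [List.replicate, List.append_nil] at hk
      exact absurd (String.toList_inj.mp hk) hne
    | succ k' =>
      refine ⟨List.replicate k' '/', ?_⟩
      rw [hk, List.replicate_succ, List.append_assoc]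
      rfl

-- slash-prefix list: characterization and distinctness
theorem pv_slashPrefixes_eq (q : String) :
    pvSlashPrefixes q = PySem.Set.ofList
      (((PySem.List.enumerate q.toList).filter (fun ic => ic.2 == '/')).map
        (fun ic => String.ofList (PySem.List.slice q.toList none (some ic.1)))) := by
  unfold pvSlashPrefixes
  rw [PySem.List.foldl_if_eq_foldl_filter]
  rw [← PySem.Set.update_map_eq_foldl_add]
  exact PySem.Set.update_nil_left _

theorem pv_mem_slashPrefixes (q r : String) :
    r ∈ pvSlashPrefixes q ↔ (r.toList ++ ['/'] <+: q.toList) := by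
  rw [pv_slashPrefixes_eq, PySem.Set.mem_ofList]
  simp only [List.mem_map, List.mem_filter, PySem.List.mem_enumerate_iff]
  constructor
  · rintro ⟨ic, ⟨⟨k, hklt, rfl⟩, hsl⟩, rfl⟩
    have hch : q.toList[k] = '/' := by simpa using hsl
    have hsli : PySem.List.slice q.toList none (some ((0 : Int) + k)) = q.toList.take k := by
      rw [zero_add]; exact PySem.List.slice_to_natCast q.toList k
    rw [hsli, String.toList_ofList]
    have ht : q.toList.take k ++ ['/'] = q.toList.take (k + 1) := by
      rw [List.take_succ, List.getElem?_eq_getElem hklt, hch]; rfl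
    rw [ht]
    exact List.take_prefix _ _
  · rintro ⟨t, ht⟩
    have hq : q.toList = r.toList ++ '/' :: t := by
      rw [← ht]; simp
    have hlen : r.toList.length < q.toList.length := by
      rw [hq]; simp
    have hch : q.toList[r.toList.length]'hlen = '/' := by
      rw [List.getElem_of_eq hq]
      rw [List.getElem_append_right (Nat.le_refl _)]
      simp
    refine ⟨((0 : Int) + r.toList.length, q.toList[r.toList.length]'hlen),
      ⟨⟨r.toList.length, hlen, rfl⟩, by simpa using hch⟩, ?_⟩
    have hsli : PySem.List.slice q.toList none (some ((0 : Int) + r.toList.length))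
        = q.toList.take r.toList.length := by
      rw [zero_add]; exact PySem.List.slice_to_natCast q.toList r.toList.length
    rw [hsli, hq, List.take_left, String.ofList_toList]

theorem pv_nodup_slashPrefixes (q : String) : (pvSlashPrefixes q).Nodup := by
  rw [pv_slashPrefixes_eq]; exact PySem.Set.nodup_ofList _

theorem pv_getD_below_aux (r : String) :
    ∀ (l : List String) (b : PySem.Dict String Int),
      (l.foldl (fun b q => (pvSlashPrefixes q).foldl (fun b r => b.insert r (b.getD r 0 + 1)) b) b).getD r 0
        = b.getD r 0 + (l.countP (fun q => decide (r ∈ pvSlashPrefixes q)) : Int) := by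
  intro l
  induction l with
  | nil => intro b; simp
  | cons q t ih =>
    intro b
    simp only [List.foldl_cons]
    rw [ih, PySem.Dict.getD_foldl_insert_add_one]
    have hc : (pvSlashPrefixes q).count r = if r ∈ pvSlashPrefixes q then 1 else 0 := by
      by_cases h : r ∈ pvSlashPrefixes q
      · simp only [h, if_true]
        exact List.count_eq_one_of_mem (pv_nodup_slashPrefixes q) h
      · simp only [h, if_false]
        exact List.count_eq_zero.mpr h
    rw [hc, List.countP_cons]
    by_cases h : r ∈ pvSlashPrefixes q <;> simp [h] <;> push_cast <;> ring

-- the counter computes, for each r, how many listed paths lie strictly below r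
theorem pv_getD_below (paths : List String) (r : String) :
    (pvBelow paths).getD r 0 = (paths.countP (fun q => decide (r ∈ pvSlashPrefixes q)) : Int) := by
  unfold pvBelow
  rw [pv_getD_below_aux]
  simp

-- on a duplicate-free list: an element other than p satisfying pred exists iff the count reaches the threshold
theorem pv_exists_ne_iff_countP {α : Type} [DecidableEq α] (l : List α) (hn : l.Nodup) (p : α)
    (hp : p ∈ l) (pred : α → Bool) :
    (∃ q ∈ l, q ≠ p ∧ pred q = true) ↔ (if pred p then 2 else 1) ≤ l.countP pred := by
  have hF : (l.filter pred).Nodup := List.Nodup.filter pred hn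
  rw [List.countP_eq_length_filter]
  by_cases hpp : pred p = true
  · have hpF : p ∈ l.filter pred := List.mem_filter.mpr ⟨hp, hpp⟩
    simp only [hpp, if_true]
    constructor
    · rintro ⟨q, hq, hne, hqp⟩
      have hqF : q ∈ (l.filter pred).erase p :=
        (List.Nodup.mem_erase_iff hF).mpr ⟨hne, List.mem_filter.mpr ⟨hq, hqp⟩⟩
      have h1 : 0 < ((l.filter pred).erase p).length := List.length_pos_of_mem hqF
      have h2 := List.length_erase_of_mem hpF
      omega
    · intro hlen
      have h2 := List.length_erase_of_mem hpF
      have h1 : 0 < ((l.filter pred).erase p).length := by omega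
      obtain ⟨q, hq⟩ := List.exists_mem_of_length_pos h1
      have := (List.Nodup.mem_erase_iff hF).mp hq
      have hqf := List.mem_filter.mp this.2
      exact ⟨q, hqf.1, this.1, hqf.2⟩
  · simp only [hpp, if_false]
    constructor
    · rintro ⟨q, hq, hne, hqp⟩
      exact List.length_pos_of_mem (List.mem_filter.mpr ⟨hq, hqp⟩)
    · intro hlen
      obtain ⟨q, hq⟩ := List.exists_mem_of_length_pos hlen
      have hqf := List.mem_filter.mp hq
      refine ⟨q, hqf.1, ?_, hqf.2⟩
      intro h; rw [h] at hqf
      exact absurd hqf.2 (by simp [hpp])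

-- A's cascade test agrees with B's counter test
theorem pv_cascade_iff_below (node_set : List String) (tmap nmap : List (String × String))
    (u : String) (hu : u ∈ node_set.filter (pvTyped tmap)) :
    (PySem.Set.contains (pvCascade node_set tmap nmap) u = true)
      ↔ ((pvBelow (PySem.Set.ofList ((node_set.filter (pvTyped tmap)).map (pvName nmap)))).getD
            (pvRstripSlash (pvName nmap u)) 0
          ≥ (if pvName nmap u != pvRstripSlash (pvName nmap u) then (2 : Int) else 1)) := by
  have hBPn : (PySem.Set.ofList ((node_set.filter (pvTyped tmap)).map (pvName nmap))).Nodup :=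
    PySem.Set.nodup_ofList _
  have hpBP : pvName nmap u ∈ PySem.Set.ofList ((node_set.filter (pvTyped tmap)).map (pvName nmap)) :=
    (PySem.Set.mem_ofList _ _).mpr (List.mem_map.mpr ⟨u, hu, rfl⟩)
  rw [PySem.Set.contains_iff]
  rw [pv_mem_cascade node_set tmap nmap u hu]
  unfold pvAcond
  rw [List.any_eq_true]
  -- the existential over A's value set is the existential over B's path set
  have hmemiff : ∀ x : String,
      x ∈ PySem.Set.ofList (pvFilePaths node_set tmap nmap).values
        ↔ x ∈ PySem.Set.ofList ((node_set.filter (pvTyped tmap)).map (pvName nmap)) := by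
    intro x
    rw [PySem.Set.mem_ofList, PySem.Set.mem_ofList, pv_mem_values_filePaths, List.mem_map]
    constructor
    · rintro ⟨k, hk, rfl⟩; exact ⟨k, hk, rfl⟩
    · rintro ⟨k, hk, rfl⟩; exact ⟨k, hk, rfl⟩
  have hbody : ∀ x : String,
      ((x != pvName nmap u && PySem.Str.startswith x (pvRstripSlash (pvName nmap u) ++ "/")) = true)
        ↔ (x ≠ pvName nmap u ∧ ((pvRstripSlash (pvName nmap u)).toList ++ ['/'] <+: x.toList)) := by
    intro x
    rw [Bool.and_eq_true, bne_iff_ne, PySem.Str.startswith_eq]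
    have ha : (pvRstripSlash (pvName nmap u) ++ "/").toList
        = (pvRstripSlash (pvName nmap u)).toList ++ ['/'] := by simp
    rw [ha] at *
    constructor
    · rintro ⟨h1, h2⟩
      exact ⟨h1, (PySem.Chars.startswith_iff _ _).mp (by rw [← ha]; exact h2)⟩
    · rintro ⟨h1, h2⟩
      exact ⟨h1, by rw [ha]; exact (PySem.Chars.startswith_iff _ _).mpr h2⟩
  have hEx : (∃ x ∈ PySem.Set.ofList (pvFilePaths node_set tmap nmap).values,
        (x != pvName nmap u && PySem.Str.startswith x (pvRstripSlash (pvName nmap u) ++ "/")) = true)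
      ↔ (∃ q ∈ PySem.Set.ofList ((node_set.filter (pvTyped tmap)).map (pvName nmap)),
          q ≠ pvName nmap u ∧
            (fun x => decide ((pvRstripSlash (pvName nmap u)).toList ++ ['/'] <+: x.toList)) q = true) := by
    constructor
    · rintro ⟨x, hx, hb⟩
      have := (hbody x).mp hb
      exact ⟨x, (hmemiff x).mp hx, this.1, by simpa using this.2⟩
    · rintro ⟨x, hx, hne, hb⟩
      exact ⟨x, (hmemiff x).mpr hx, (hbody x).mpr ⟨hne, by simpa using hb⟩⟩
  rw [hEx]
  rw [pv_exists_ne_iff_countP _ hBPn _ hpBP]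
  have hcp : ((PySem.Set.ofList ((node_set.filter (pvTyped tmap)).map (pvName nmap))).countP
        (fun x => decide ((pvRstripSlash (pvName nmap u)).toList ++ ['/'] <+: x.toList)))
      = ((PySem.Set.ofList ((node_set.filter (pvTyped tmap)).map (pvName nmap))).countP
        (fun q => decide ((pvRstripSlash (pvName nmap u)) ∈ pvSlashPrefixes q))) := by
    apply List.countP_congr
    intro x _
    simp only [decide_eq_true_eq]
    exact (pv_mem_slashPrefixes x (pvRstripSlash (pvName nmap u))).symm
  rw [hcp]
  rw [ge_iff_le, pv_getD_below]
  by_cases hpr : pvName nmap u = pvRstripSlash (pvName nmap u)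
  · have h1 : decide ((pvRstripSlash (pvName nmap u)).toList ++ ['/'] <+: (pvName nmap u).toList)
        = false := by
      simp only [decide_eq_false_iff_not, pv_prefix_self_iff]
      exact fun h => h hpr
    have h2 : (pvName nmap u != pvRstripSlash (pvName nmap u)) = false := by
      simpa using hpr
    rw [h1, h2]
    simp only [Bool.false_eq_true, if_false]
    omega
  · have h1 : decide ((pvRstripSlash (pvName nmap u)).toList ++ ['/'] <+: (pvName nmap u).toList)
        = true := by
      simp only [decide_eq_true_eq]
      exact (pv_prefix_self_iff (pvName nmap u)).mpr hpr
    have h2 : (pvName nmap u != pvRstripSlash (pvName nmap u)) = true := by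
      simpa using hpr
    rw [h1, h2]
    simp only [if_true]
    omega

-- the two dedup-building passes agree
theorem pv_stage2_eq (node_set : List String) (tmap nmap : List (String × String)) :
    pvStage2A node_set tmap nmap
      = pvStage2B
          (node_set.filterMap (fun u => if pvTyped tmap u then some (u, pvName nmap u) else none))
          (pvBelow (PySem.Set.ofList
            ((node_set.filterMap (fun u => if pvTyped tmap u then some (u, pvName nmap u) else none)).map (·.2)))) := by
  rw [pv_filterMap_eq]
  have hmm : ((node_set.filter (pvTyped tmap)).map (fun u => (u, pvName nmap u))).map (·.2)
      = (node_set.filter (pvTyped tmap)).map (pvName nmap) := by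
    rw [List.map_map]; rfl
  rw [hmm]
  simp only [pvStage2A, pvStage2B]
  rw [pv_foldl_skip (pvTyped tmap)
    (fun (st : PySem.Dict String String × PySem.Dict String (Option String)) (u : String) =>
      if PySem.Set.contains (pvCascade node_set tmap nmap) u then (st.1, st.2.insert u none)
      else
        match st.1.get? (pvName nmap u) with
        | none => (st.1.insert (pvName nmap u) u, st.2)
        | some r => (st.1, st.2.insert u (some r)))]
  rw [List.foldl_map]
  apply PySem.List.foldl_congr_mem
  intro st u hu
  have hiff := pv_cascade_iff_below node_set tmap nmap u hu
  by_cases hC : PySem.Set.contains (pvCascade node_set tmap nmap) u = true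
  · rw [if_pos hC, if_pos (hiff.mp hC)]
  · rw [if_neg hC, if_neg (fun h => hC (hiff.mpr h))]
    cases st.1.get? (pvName nmap u) <;> rfl

-- A's inline edge step is B's helper step
theorem pv_edge_step_eq (fd : PySem.Dict String (Option String))
    (st : PySem.Set (String × String × String) × List (List (String × String)))
    (e : List (String × String)) :
    pvEdgeStepA fd st e
      = match pvRemapEdge e fd st.1 with
        | (seen, some ne) => (seen, st.2 ++ [ne])
        | (seen, none) => (seen, st.2) := by
  simp only [pvEdgeStepA, pvRemapEdge]
  cases (PySem.Dict.mk e).get? "src" with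
  | none => rfl
  | some es =>
  cases (PySem.Dict.mk e).get? "dst" with
  | none => rfl
  | some edst =>
  dsimp only
  cases (fd.get? es).getD (some es) with
  | none => cases (fd.get? edst).getD (some edst) <;> rfl
  | some s' =>
  cases (fd.get? edst).getD (some edst) with
  | none => rfl
  | some d' =>
  dsimp only
  by_cases hsd : (s' == d') = true
  · simp [hsd]
  · simp only [hsd, Bool.false_eq_true, if_false]
    cases (PySem.Dict.mk e).get? "edge_type" with
    | none => rfl
    | some et =>
    dsimp only
    by_cases hseen : (s', d', et) ∈ st.1
    · simp [hseen]
    · simp [hseen]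

-- ===== VERDICT (by name: the statement is the Claim_ definition above) =====
theorem dedup_files_py_spec : Claim_equal_dedup_files_py := by
  intro node_set edges tmap nmap _ _
  unfold Spec_dedup_files_py
  simp only [dedup_files_py, dedup_files_py_alt]
  rw [← pv_stage2_eq node_set tmap nmap]
  have he : ∀ (st : PySem.Set (String × String × String) × List (List (String × String)))
      (e : List (String × String)), e ∈ edges →
      pvEdgeStepA (pvStage2A node_set tmap nmap).2 st e
        = (fun st e => match pvRemapEdge e (pvStage2A node_set tmap nmap).2 st.1 with
            | (seen, some ne) => (seen, st.2 ++ [ne])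
            | (seen, none) => (seen, st.2)) st e := by
    intro st e _
    exact pv_edge_step_eq _ st e
  rw [PySem.List.foldl_congr_mem edges _ _ _ he]
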